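-- pv_equiv track=rewrite | github.com/AlecGuerin/Advent_of_code_24 | 14/Restroom_Redoubt.py | get_minimum_entropy
-- ===== SOURCE A (Python) =====
-- DEFAULT_W = 101
--
-- DEFAULT_H = 103
--
-- def compute_robot_position(initialVector, steps, height = DEFAULT_H, width = DEFAULT_W):
--
--     nx = (initialVector[0] + steps * initialVector[2]) % width
--     ny = (initialVector[1] + steps * initialVector[3]) % height
--     endPos = [nx, ny]
--     return endPos
--
-- def get_robots_pos(data, steps, height = DEFAULT_H, width = DEFAULT_W):
--
--     # for i in range(6):
--     #     a = compute_robot_position([2,4,2,-3], i, height, length)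
--     pos = []
--     for d in data:
--         pos.append(compute_robot_position(d, steps, height, width))
--
--     # COmpute quadran
--     quadranCnt = [0,0,0,0]
--     midY = height//2
--     midX = width//2
--     for p in pos:
--         if p[0] <  midX and  p[1] < midY:
--             quadranCnt[0] +=1
--         elif p[0] <  midX and  p[1] > midY:
--             quadranCnt[1] +=1
--         elif p[0] >  midX and  p[1] < midY:
--             quadranCnt[2] +=1
--         elif p[0] >  midX and  p[1] > midY:
--             quadranCnt[3] +=1
--         else:
--             pass
--
--     return quadranCnt[0] * quadranCnt[1] * quadranCnt[2] * quadranCnt[3]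
--
-- def get_minimum_entropy(data, height = DEFAULT_H, width = DEFAULT_W):
--
--     bestI = -1
--     lowEnt = 10**9
--
--     for i in range(height*width):
--         entropy = get_robots_pos(data, i, height, width)
--         if entropy < lowEnt:
--             lowEnt = entropy
--             bestI = i
--
--     return bestI
-- ===== SOURCE B (Python) =====
-- DEFAULT_W = 101
--
-- DEFAULT_H = 103
--
-- def _classify(c, mid):
--     # 0 = strictly left/above of the mid line, 1 = on it, 2 = strictly beyond it
--     return 0 if c < mid else (1 if c == mid else 2)
--
-- def get_minimum_entropy(data, height = DEFAULT_H, width = DEFAULT_W):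
--     if height * width <= 0:
--         return -1  # no step to scan
--     midX = width // 2
--     midY = height // 2
--     # Positions are periodic: x depends only on step % width, y on step % height.
--     # Precompute each robot's x-class per x-phase and y-class per y-phase once.
--     xcls = [[_classify((d[0] + a * d[2]) % width, midX) for a in range(width)] for d in data]
--     ycls = [[_classify((d[1] + a * d[3]) % height, midY) for a in range(height)] for d in data]
--     bestI = -1
--     lowEnt = 10 ** 9
--     for i in range(height * width):
--         q = [0, 0, 0, 0]
--         for cx, cy in zip(xcls, ycls):
--             cxi = cx[i % width]
--             cyi = cy[i % height]
--             if cxi != 1 and cyi != 1: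
--                 q[(cxi // 2) * 2 + (cyi // 2)] += 1
--         ent = q[0] * q[1] * q[2] * q[3]
--         if ent < lowEnt:
--             lowEnt = ent
--             bestI = i
--     return bestI
-- ===== Notes on version B (the rewrite author's own statement) =====
-- stated objective: alternative
-- what changed: B exploits the periodicity of each robot's coordinates (x repeats with period width, y with period height): it precomputes per-robot quadrant-class tables indexed by step phase once, and the main loop over the height*width candidate steps only does two table lookups per robot and increments the quadrant counter selected by an arithmetic index, instead of recomputing both modular positions and re-deriving the quadrant by a four-way comparison chain at every step.
-- outside the precondition, e.g. on get_minimum_entropy([[0, 0, 0, 0]], -1, -1): A returns 0, B raises IndexError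
import Mathlib
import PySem

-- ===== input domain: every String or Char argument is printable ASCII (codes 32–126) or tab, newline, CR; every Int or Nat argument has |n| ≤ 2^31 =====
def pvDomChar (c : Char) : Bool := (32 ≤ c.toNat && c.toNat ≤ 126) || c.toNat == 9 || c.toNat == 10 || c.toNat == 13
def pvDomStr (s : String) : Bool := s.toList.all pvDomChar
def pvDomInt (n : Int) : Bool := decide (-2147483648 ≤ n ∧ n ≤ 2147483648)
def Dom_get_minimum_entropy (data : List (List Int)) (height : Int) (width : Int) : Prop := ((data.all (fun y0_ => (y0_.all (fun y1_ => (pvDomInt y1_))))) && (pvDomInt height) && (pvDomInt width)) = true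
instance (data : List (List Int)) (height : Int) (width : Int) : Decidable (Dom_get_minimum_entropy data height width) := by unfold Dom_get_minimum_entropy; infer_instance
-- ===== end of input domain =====

-- B replaces A's per-step recomputation of every robot's modular position and four-way comparison chain by
-- per-robot phase-indexed quadrant-class tables built once, the main loop doing only table lookups.


-- ===== PORT A =====
def pvComputeRobotPosition (initialVector : List Int) (steps height width : Int) : List Int :=
  let nx := PySem.Int.mod (PySem.List.pyGetD initialVector 0 0 + steps * PySem.List.pyGetD initialVector 2 0) width
  let ny := PySem.Int.mod (PySem.List.pyGetD initialVector 1 0 + steps * PySem.List.pyGetD initialVector 3 0) height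
  [nx, ny]

def pvGetRobotsPos (data : List (List Int)) (steps height width : Int) : Int :=
  let pos := data.foldl (fun acc d => acc ++ [pvComputeRobotPosition d steps height width]) []
  let midY := PySem.Int.floordiv height 2
  let midX := PySem.Int.floordiv width 2
  let q := pos.foldl (fun (q : Int × Int × Int × Int) p =>
      let x := PySem.List.pyGetD p 0 0
      let y := PySem.List.pyGetD p 1 0
      if x < midX ∧ y < midY then (q.1 + 1, q.2.1, q.2.2.1, q.2.2.2)
      else if x < midX ∧ y > midY then (q.1, q.2.1 + 1, q.2.2.1, q.2.2.2)
      else if x > midX ∧ y < midY then (q.1, q.2.1, q.2.2.1 + 1, q.2.2.2)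
      else if x > midX ∧ y > midY then (q.1, q.2.1, q.2.2.1, q.2.2.2 + 1)
      else q) (0, 0, 0, 0)
  q.1 * q.2.1 * q.2.2.1 * q.2.2.2

def get_minimum_entropy (data : List (List Int)) (height : Int) (width : Int) : Int :=
  ((PySem.List.pyRange 0 (height * width) 1).foldl
    (fun (s : Int × Int) i =>
      let entropy := pvGetRobotsPos data i height width
      if entropy < s.1 then (entropy, i) else s) ((10 : Int) ^ 9, -1)).2

-- ===== PORT B =====
def pvClassify (c mid : Int) : Int := if c < mid then 0 else if c = mid then 1 else 2

def get_minimum_entropy_alt (data : List (List Int)) (height : Int) (width : Int) : Int :=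
  if height * width ≤ 0 then -1
  else
  let midX := PySem.Int.floordiv width 2
  let midY := PySem.Int.floordiv height 2
  let xcls := data.map (fun d => (PySem.List.pyRange 0 width 1).map
    (fun a => pvClassify (PySem.Int.mod (PySem.List.pyGetD d 0 0 + a * PySem.List.pyGetD d 2 0) width) midX))
  let ycls := data.map (fun d => (PySem.List.pyRange 0 height 1).map
    (fun a => pvClassify (PySem.Int.mod (PySem.List.pyGetD d 1 0 + a * PySem.List.pyGetD d 3 0) height) midY))
  ((PySem.List.pyRange 0 (height * width) 1).foldl
    (fun (s : Int × Int) i =>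
      let q := (xcls.zip ycls).foldl
        (fun (q : List Int) cxy =>
          let cxi := PySem.List.pyGetD cxy.1 (PySem.Int.mod i width) 0
          let cyi := PySem.List.pyGetD cxy.2 (PySem.Int.mod i height) 0
          if cxi ≠ 1 ∧ cyi ≠ 1 then
            PySem.List.pySetD q (PySem.Int.floordiv cxi 2 * 2 + PySem.Int.floordiv cyi 2)
              (PySem.List.pyGetD q (PySem.Int.floordiv cxi 2 * 2 + PySem.Int.floordiv cyi 2) 0 + 1)
          else q) [0, 0, 0, 0]
      let ent := PySem.List.pyGetD q 0 0 * PySem.List.pyGetD q 1 0 *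
        PySem.List.pyGetD q 2 0 * PySem.List.pyGetD q 3 0
      if ent < s.1 then (ent, i) else s) ((10 : Int) ^ 9, -1)).2

-- ===== PRECONDITION & SPEC =====
-- Pre_ excludes exactly the inputs where some executed loop indexes a robot row with fewer than four fields
-- (there A and B both raise IndexError), and the out-of-domain corner of two strictly negative board
-- dimensions with robots present, where A still returns a value via Python's negative modulo but B's phase
-- tables (built over range(width)/range(height)) are empty and B raises IndexError.
def Pre_get_minimum_entropy (data : List (List Int)) (height : Int) (width : Int) : Prop :=
  height * width ≤ 0 ∨ data = [] ∨ (1 ≤ height ∧ 1 ≤ width ∧ ∀ d ∈ data, 4 ≤ d.length)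
instance (data : List (List Int)) (height : Int) (width : Int) : Decidable (Pre_get_minimum_entropy data height width) := by unfold Pre_get_minimum_entropy; infer_instance

def pvWitness_get_minimum_entropy : List (List Int) × Int × Int := ([[0, 0, 1, 1], [1, 1, 1, -1]], 2, 2)

def Spec_get_minimum_entropy (data : List (List Int)) (height : Int) (width : Int) (out : Int) : Prop := out = get_minimum_entropy_alt data height width
instance (data : List (List Int)) (height : Int) (width : Int) (out : Int) : Decidable (Spec_get_minimum_entropy data height width out) := by unfold Spec_get_minimum_entropy; infer_instance

-- ===== CLAIM (what is proved, stated in full; the proofs are below) =====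
def Claim_equal_get_minimum_entropy : Prop := ∀ (data : List (List Int)) (height : Int) (width : Int), Dom_get_minimum_entropy data height width → Pre_get_minimum_entropy data height width → Spec_get_minimum_entropy data height width (get_minimum_entropy data height width)

-- ===== LEMMAS AND PROOFS =====

-- Python modulo is invariant under reducing the step modulo the board dimension.
lemma pv_mod_step (r0 r2 i w : Int) (hw : 0 < w) :
    PySem.Int.mod (r0 + PySem.Int.mod i w * r2) w = PySem.Int.mod (r0 + i * r2) w := by
  rw [PySem.Int.mod_eq_emod_of_pos hw, PySem.Int.mod_eq_emod_of_pos hw,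
    PySem.Int.mod_eq_emod_of_pos hw]
  have h : r0 + i % w * r2 = (r0 + i * r2) + w * (-(i / w) * r2) := by
    rw [Int.emod_def]; ring
  rw [h, Int.add_mul_emod_self_left]

-- Looking up the phase table at phase i % w is classifying the true position at step i.
lemma pv_table (r0 r2 i w m : Int) (hw : 1 ≤ w) :
    PySem.List.pyGetD ((PySem.List.pyRange 0 w 1).map
      (fun a => pvClassify (PySem.Int.mod (r0 + a * r2) w) m)) (PySem.Int.mod i w) 0
    = pvClassify (PySem.Int.mod (r0 + i * r2) w) m := by
  rw [PySem.List.pyGetD_map_pyRange_of_nonneg _ _ _ _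
    (PySem.Int.mod_nonneg i (by omega)) (PySem.Int.mod_lt i (by omega)),
    pv_mod_step r0 r2 i w (by omega)]

set_option maxHeartbeats 1000000 in
-- One robot: B's indexed counter bump equals A's comparison chain (on corresponding states).
lemma pv_step (x y midX midY a b c d : Int) :
    (let cxi := pvClassify x midX
     let cyi := pvClassify y midY
     if cxi ≠ 1 ∧ cyi ≠ 1 then
       PySem.List.pySetD [a, b, c, d] (PySem.Int.floordiv cxi 2 * 2 + PySem.Int.floordiv cyi 2)
         (PySem.List.pyGetD [a, b, c, d] (PySem.Int.floordiv cxi 2 * 2 + PySem.Int.floordiv cyi 2) 0 + 1)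
     else [a, b, c, d])
    = (fun t : Int × Int × Int × Int => [t.1, t.2.1, t.2.2.1, t.2.2.2])
      (if x < midX ∧ y < midY then (a + 1, b, c, d)
       else if x < midX ∧ y > midY then (a, b + 1, c, d)
       else if x > midX ∧ y < midY then (a, b, c + 1, d)
       else if x > midX ∧ y > midY then (a, b, c, d + 1)
       else (a, b, c, d)) := by
  rcases lt_trichotomy x midX with hx | hx | hx <;>
    rcases lt_trichotomy y midY with hy | hy | hy <;>
      simp only [pvClassify] <;>
      split_ifs <;>
      first
        | omega
        | simp [PySem.Int.floordiv, PySem.List.pySetD, PySem.List.pySet?,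
            PySem.List.pyGetD, PySem.List.pyGet?, PySem.List.pyIdx?]

-- All robots: B's counter-list fold mirrors A's quadrant-tuple fold.
lemma pv_fold (height width i : Int) (hh : 1 ≤ height) (hw : 1 ≤ width) :
    ∀ (data : List (List Int)) (a b c d : Int),
    data.foldl (fun (q : List Int) (r : List Int) =>
        let cxi := PySem.List.pyGetD ((PySem.List.pyRange 0 width 1).map
          (fun a => pvClassify (PySem.Int.mod (PySem.List.pyGetD r 0 0 + a * PySem.List.pyGetD r 2 0) width)
            (PySem.Int.floordiv width 2))) (PySem.Int.mod i width) 0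
        let cyi := PySem.List.pyGetD ((PySem.List.pyRange 0 height 1).map
          (fun a => pvClassify (PySem.Int.mod (PySem.List.pyGetD r 1 0 + a * PySem.List.pyGetD r 3 0) height)
            (PySem.Int.floordiv height 2))) (PySem.Int.mod i height) 0
        if cxi ≠ 1 ∧ cyi ≠ 1 then
          PySem.List.pySetD q (PySem.Int.floordiv cxi 2 * 2 + PySem.Int.floordiv cyi 2)
            (PySem.List.pyGetD q (PySem.Int.floordiv cxi 2 * 2 + PySem.Int.floordiv cyi 2) 0 + 1)
        else q) [a, b, c, d]
    = (fun t : Int × Int × Int × Int => [t.1, t.2.1, t.2.2.1, t.2.2.2])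
      (data.foldl (fun (q : Int × Int × Int × Int) (r : List Int) =>
        let x := PySem.Int.mod (PySem.List.pyGetD r 0 0 + i * PySem.List.pyGetD r 2 0) width
        let y := PySem.Int.mod (PySem.List.pyGetD r 1 0 + i * PySem.List.pyGetD r 3 0) height
        if x < PySem.Int.floordiv width 2 ∧ y < PySem.Int.floordiv height 2 then (q.1 + 1, q.2.1, q.2.2.1, q.2.2.2)
        else if x < PySem.Int.floordiv width 2 ∧ y > PySem.Int.floordiv height 2 then (q.1, q.2.1 + 1, q.2.2.1, q.2.2.2)
        else if x > PySem.Int.floordiv width 2 ∧ y < PySem.Int.floordiv height 2 then (q.1, q.2.1, q.2.2.1 + 1, q.2.2.2)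
        else if x > PySem.Int.floordiv width 2 ∧ y > PySem.Int.floordiv height 2 then (q.1, q.2.1, q.2.2.1, q.2.2.2 + 1)
        else q) (a, b, c, d)) := by
  intro data
  induction data with
  | nil => intro a b c d; rfl
  | cons r rest ih =>
    intro a b c d
    simp only [List.foldl_cons]
    rw [pv_table _ _ i width _ hw, pv_table _ _ i height _ hh, pv_step]
    rcases hstep :
        (if PySem.Int.mod (PySem.List.pyGetD r 0 0 + i * PySem.List.pyGetD r 2 0) width < PySem.Int.floordiv width 2 ∧
              PySem.Int.mod (PySem.List.pyGetD r 1 0 + i * PySem.List.pyGetD r 3 0) height < PySem.Int.floordiv height 2 then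
            (a + 1, b, c, d)
          else if PySem.Int.mod (PySem.List.pyGetD r 0 0 + i * PySem.List.pyGetD r 2 0) width < PySem.Int.floordiv width 2 ∧
              PySem.Int.mod (PySem.List.pyGetD r 1 0 + i * PySem.List.pyGetD r 3 0) height > PySem.Int.floordiv height 2 then
            (a, b + 1, c, d)
          else if PySem.Int.mod (PySem.List.pyGetD r 0 0 + i * PySem.List.pyGetD r 2 0) width > PySem.Int.floordiv width 2 ∧
              PySem.Int.mod (PySem.List.pyGetD r 1 0 + i * PySem.List.pyGetD r 3 0) height < PySem.Int.floordiv height 2 then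
            (a, b, c + 1, d)
          else if PySem.Int.mod (PySem.List.pyGetD r 0 0 + i * PySem.List.pyGetD r 2 0) width > PySem.Int.floordiv width 2 ∧
              PySem.Int.mod (PySem.List.pyGetD r 1 0 + i * PySem.List.pyGetD r 3 0) height > PySem.Int.floordiv height 2 then
            (a, b, c, d + 1)
          else (a, b, c, d)) with ⟨a', b', c', d'⟩
    exact ih a' b' c' d'

theorem get_minimum_entropy_spec : Claim_equal_get_minimum_entropy := by
  intro data height width _ hpre
  unfold Spec_get_minimum_entropy
  by_cases hle : height * width ≤ 0
  · simp only [get_minimum_entropy, get_minimum_entropy_alt,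
      PySem.List.pyRange_one_eq_nil hle, List.foldl_nil, if_pos hle]
  · have hcase : data = [] ∨ (1 ≤ height ∧ 1 ≤ width) := by
      rcases hpre with h | h | ⟨hh, hw, -⟩
      · omega
      · exact Or.inl h
      · exact Or.inr ⟨hh, hw⟩
    rcases hcase with rfl | ⟨hh, hw⟩
    · simp only [get_minimum_entropy, get_minimum_entropy_alt, if_neg hle,
        List.map_nil, List.zip_nil_left]
      rfl
    simp only [get_minimum_entropy, get_minimum_entropy_alt, if_neg hle, List.zip_map']
    refine congrArg Prod.snd (List.foldl_ext _ _ _ (fun s i _ => ?_))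
    rw [List.foldl_map, pv_fold height width i hh hw]
    simp only [pvGetRobotsPos, pvComputeRobotPosition,
      PySem.List.foldl_append_singleton_eq_map, List.nil_append]
    rw [List.foldl_map]
    simp [PySem.List.pyGetD, PySem.List.pyGet?, PySem.List.pyIdx?]
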